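-- pv_equiv track=rewrite | github.com/scaboodles/Advent-of-Code-2022 | day8/day8.py | outerVisible
-- ===== SOURCE A (Python) =====
-- import copy
--
-- def outerVisible(trees):
--     newTrees = copy.deepcopy(trees)
--     for i in range(len(trees)):
--         for j in range(len(trees[i])):
--             if i == 0 or i == len(trees) - 1:
--                 newTrees[i][j] = True
--             if j == 0 or j == len(trees[i]) - 1:
--                 newTrees[i][j] = True
--     return newTrees
-- ===== SOURCE B (Python) =====
-- def outerVisible(trees):
--     new = [row[:] for row in trees]
--     if new:
--         new[0] = [True] * len(new[0])
--         new[-1] = [True] * len(new[-1])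
--     for row in new:
--         if row:
--             row[0] = True
--             row[-1] = True
--     return new
-- ===== Notes on version B (the rewrite author's own statement) =====
-- stated objective: simpler
-- what changed: B replaces A's nested scan over every cell (with per-cell border tests) by perimeter-only passes: fill the first and last row with True, then set the first and last element of each nonempty row.
import Mathlib
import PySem

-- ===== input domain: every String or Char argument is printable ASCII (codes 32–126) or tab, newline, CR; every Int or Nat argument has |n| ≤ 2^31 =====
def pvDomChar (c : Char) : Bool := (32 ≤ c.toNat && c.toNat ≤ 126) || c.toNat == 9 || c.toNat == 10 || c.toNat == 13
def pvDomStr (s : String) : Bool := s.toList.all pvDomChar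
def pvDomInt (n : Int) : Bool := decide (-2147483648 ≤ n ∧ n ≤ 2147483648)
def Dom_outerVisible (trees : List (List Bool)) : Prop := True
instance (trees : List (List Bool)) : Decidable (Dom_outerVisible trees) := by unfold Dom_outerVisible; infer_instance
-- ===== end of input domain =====

-- B replaces A's full nested scan over every cell with perimeter-only passes
-- (fill first/last row, then set first/last element of each row): simpler, same output.

-- ===== PORT A =====
-- newTrees[i][j] = True
def setCell (nt : List (List Bool)) (i j : Nat) (v : Bool) : List (List Bool) :=
  nt.set i ((nt.getD i []).set j v)

-- literal transliteration of A: deepcopy (pure copy), nested index loops, two ifs in order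
def outerVisible (trees : List (List Bool)) : List (List Bool) :=
  (List.range trees.length).foldl
    (fun nt i =>
      (List.range (trees.getD i []).length).foldl
        (fun nt2 j =>
          let nt3 := if i = 0 ∨ i = trees.length - 1 then setCell nt2 i j true else nt2
          if j = 0 ∨ j = (trees.getD i []).length - 1 then setCell nt3 i j true else nt3)
        nt)
    trees

-- ===== PORT B =====
-- [True] * len(r)
def allTrueRow (r : List Bool) : List Bool := r.map (fun _ => true)

-- row[0] = True; row[-1] = True  (skipping empty rows)
def edgeRow (r : List Bool) : List Bool :=
  if r.isEmpty then r else (r.set 0 true).set (r.length - 1) true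

-- literal transliteration of B: fill first and last row, then edge every row
def outerVisible_alt (trees : List (List Bool)) : List (List Bool) :=
  let nt :=
    if trees.isEmpty then trees
    else
      let nt1 := trees.set 0 (allTrueRow (trees.getD 0 []))
      nt1.set (nt1.length - 1) (allTrueRow (nt1.getD (nt1.length - 1) []))
  nt.map edgeRow

-- ===== PRECONDITION & SPEC =====
def Spec_outerVisible (trees : List (List Bool)) (out : List (List Bool)) : Prop := out = outerVisible_alt trees
instance (trees : List (List Bool)) (out : List (List Bool)) : Decidable (Spec_outerVisible trees out) := by unfold Spec_outerVisible; infer_instance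

-- ===== CLAIM (what is proved, stated in full; the proofs are below) =====
def Claim_equal_outerVisible : Prop := ∀ (trees : List (List Bool)), Dom_outerVisible trees → Spec_outerVisible trees (outerVisible trees)

-- ===== LEMMAS AND PROOFS =====

theorem getD_set_self {α : Type} (l : List α) (i : Nat) (x : α) (d : α) (h : i < l.length) :
    (l.set i x).getD i d = x := by
  rw [List.getD_eq_getElem _ _ (by simpa using h), List.getElem_set_self]

theorem set_getD_self {α : Type} (l : List α) (i : Nat) (d : α) (h : i < l.length) :
    l.set i (l.getD i d) = l := by
  rw [List.getD_eq_getElem l d h]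
  exact List.set_getElem_self h

-- master lemma: a fold over range that at step i sets index i to f i (current value at i)
-- is mapIdx f
theorem foldl_range_mapIdx_aux {α : Type} (d : α) (stepf : List α → Nat → List α)
    (f : Nat → α → α)
    (h : ∀ (acc : List α) (i : Nat), i < acc.length →
      stepf acc i = acc.set i (f i (acc.getD i d)))
    (xs : List α) (n : Nat) (hn : n ≤ xs.length) :
    (List.range n).foldl stepf xs = (xs.take n).mapIdx f ++ xs.drop n := by
  induction n with
  | zero => simp
  | succ n ih =>
    have hn' : n < xs.length := by omega
    rw [List.range_succ, List.foldl_append, ih (by omega)]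
    simp only [List.foldl_cons, List.foldl_nil]
    have hlen : ((xs.take n).mapIdx f ++ xs.drop n).length = xs.length := by
      simp; omega
    rw [h _ n (by omega)]
    have hLlen : ((xs.take n).mapIdx f).length = n := by simp; omega
    have hgetD : ((xs.take n).mapIdx f ++ xs.drop n).getD n d = xs[n] := by
      rw [List.getD_eq_getElem _ d (by omega)]
      rw [List.getElem_append_right (by omega)]
      simp [hLlen, hn']
    rw [hgetD]
    have hset : ((xs.take n).mapIdx f ++ xs.drop n).set n (f n xs[n])
        = (xs.take n).mapIdx f ++ (xs.drop n).set 0 (f n xs[n]) := by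
      rw [List.set_append_right _ _ (by omega), hLlen, Nat.sub_self]
    rw [hset]
    have hdrop : xs.drop n = xs[n] :: xs.drop (n+1) := by
      rw [List.drop_eq_getElem_cons hn']
    rw [hdrop]
    have htake : xs.take (n+1) = xs.take n ++ [xs[n]] := by
      rw [List.take_add_one]; simp [List.getElem?_eq_getElem hn']
    rw [htake, List.mapIdx_append]
    have hsc : (xs[n] :: xs.drop (n+1)).set 0 (f n xs[n]) = f n xs[n] :: xs.drop (n+1) := rfl
    rw [hsc]
    have hlt : (List.take n xs).length = n := by simp; omega
    simp [hlt]

theorem foldl_range_mapIdx {α : Type} (d : α) (stepf : List α → Nat → List α)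
    (f : Nat → α → α)
    (h : ∀ (acc : List α) (i : Nat), i < acc.length →
      stepf acc i = acc.set i (f i (acc.getD i d)))
    (xs : List α) :
    (List.range xs.length).foldl stepf xs = xs.mapIdx f := by
  rw [foldl_range_mapIdx_aux d stepf f h xs xs.length (Nat.le_refl _)]
  simp

-- the row-level step of A's inner loop (i, the grid length and the row length are fixed)
def rowStep (c1 : Prop) [Decidable c1] (len : Nat) (r : List Bool) (j : Nat) : List Bool :=
  let r1 := if c1 then r.set j true else r
  if j = 0 ∨ j = len - 1 then r1.set j true else r1

-- A's inner loop over j, acting on row i of nt, hoisted to a fold on the row itself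
theorem inner_hoist (i : Nat) (c1 : Prop) [Decidable c1] (len : Nat) :
    ∀ (js : List Nat) (nt : List (List Bool)), i < nt.length →
      js.foldl
        (fun nt2 j =>
          let nt3 := if c1 then setCell nt2 i j true else nt2
          if j = 0 ∨ j = len - 1 then setCell nt3 i j true else nt3)
        nt
      = nt.set i (js.foldl (rowStep c1 len) (nt.getD i [])) := by
  intro js
  induction js with
  | nil =>
    intro nt h
    simp only [List.foldl_nil]
    exact (set_getD_self nt i [] h).symm
  | cons j js ih =>
    intro nt h
    rw [List.foldl_cons, List.foldl_cons]
    have hstep :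
        (let nt3 := if c1 then setCell nt i j true else nt
         if j = 0 ∨ j = len - 1 then setCell nt3 i j true else nt3)
        = nt.set i (rowStep c1 len (nt.getD i []) j) := by
      by_cases hc1 : c1 <;> by_cases hc2 : (j = 0 ∨ j = len - 1)
      · simp only [rowStep, setCell, if_pos hc1, if_pos hc2]
        rw [getD_set_self _ _ _ _ h, List.set_set]
      · simp only [rowStep, setCell, if_pos hc1, if_neg hc2]
      · simp only [rowStep, setCell, if_neg hc1, if_pos hc2]
      · simp only [rowStep, setCell, if_neg hc1, if_neg hc2]
        exact (set_getD_self nt i [] h).symm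
    rw [hstep, ih _ (by simp [h]), List.set_set, getD_set_self _ _ _ _ h]

-- characterization of A: every cell gets true iff it is on the border, else keeps its value
theorem outerVisible_char (trees : List (List Bool)) :
    outerVisible trees
      = trees.mapIdx (fun i r =>
          r.mapIdx (fun j x =>
            if i = 0 ∨ i = trees.length - 1 ∨ j = 0 ∨ j = (trees.getD i []).length - 1
            then true else x)) := by
  unfold outerVisible
  rw [foldl_range_mapIdx []
    (fun nt i =>
      (List.range (trees.getD i []).length).foldl
        (fun nt2 j =>
          let nt3 := if i = 0 ∨ i = trees.length - 1 then setCell nt2 i j true else nt2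
          if j = 0 ∨ j = (trees.getD i []).length - 1 then setCell nt3 i j true else nt3)
        nt)
    (fun i r =>
      (List.range (trees.getD i []).length).foldl
        (rowStep (i = 0 ∨ i = trees.length - 1) (trees.getD i []).length) r)]
  · apply List.ext_getElem (by simp)
    intro i h1 h2
    have hi : i < trees.length := by simpa using h1
    rw [List.getElem_mapIdx, List.getElem_mapIdx]
    have hr' : trees.getD i [] = trees[i]'hi := List.getD_eq_getElem _ _ hi
    rw [hr']
    rw [foldl_range_mapIdx false
      (rowStep (i = 0 ∨ i = trees.length - 1) (trees[i]'hi).length)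
      (fun j x => if i = 0 ∨ i = trees.length - 1 ∨ j = 0 ∨ j = (trees[i]'hi).length - 1 then true else x)]
    intro acc j hj
    simp only [rowStep]
    by_cases hA : (i = 0 ∨ i = trees.length - 1) <;>
      by_cases hB : (j = 0 ∨ j = (trees[i]'hi).length - 1)
    · rw [if_pos hA, if_pos hB, if_pos (by tauto), List.set_set]
    · rw [if_pos hA, if_neg hB, if_pos (by tauto)]
    · rw [if_neg hA, if_pos hB, if_pos (by tauto)]
    · rw [if_neg hA, if_neg hB, if_neg (by tauto)]
      exact (set_getD_self acc j false hj).symm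
  · intro acc i hi
    exact inner_hoist i _ _ _ acc hi

theorem length_edgeRow (r : List Bool) : (edgeRow r).length = r.length := by
  unfold edgeRow; split_ifs <;> simp

theorem edgeRow_allTrue (r : List Bool) : edgeRow (allTrueRow r) = allTrueRow r := by
  cases r with
  | nil => rfl
  | cons a l =>
    simp only [allTrueRow, List.map_cons]
    unfold edgeRow
    rw [if_neg (by simp)]
    apply List.ext_getElem (by simp)
    intro j h1 h2
    rw [List.getElem_set, List.getElem_set]
    split_ifs <;> cases j <;> simp [List.getElem_replicate]

theorem getElem_edgeRow (r : List Bool) (j : Nat) (h : j < r.length) :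
    (edgeRow r)[j]'(by rw [length_edgeRow]; exact h)
      = if j = 0 ∨ j = r.length - 1 then true else r[j] := by
  unfold edgeRow
  have hne : ¬ r.isEmpty := by cases r <;> simp_all
  simp only [if_neg hne]
  rw [List.getElem_set, List.getElem_set]
  split_ifs <;> simp_all <;> omega

-- ===== VERDICT (by name: the statement is the Claim_ definition above) =====
theorem outerVisible_spec : Claim_equal_outerVisible := by
  intro trees _
  show outerVisible trees = outerVisible_alt trees
  rw [outerVisible_char]
  unfold outerVisible_alt
  cases htrees : trees with
  | nil => simp
  | cons r0 rest =>
    rw [← htrees]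
    have hne : ¬ trees.isEmpty := by rw [htrees]; simp
    simp only [if_neg hne]
    have hnpos : 0 < trees.length := by rw [htrees]; simp
    apply List.ext_getElem
    · simp
    intro i hi1 hi2
    have hilen : i < trees.length := by simpa using hi1
    rw [List.getElem_mapIdx]
    rw [List.getElem_map]
    have hlen1 : (trees.set 0 (allTrueRow (trees.getD 0 []))).length = trees.length := by simp
    have hget0 : trees.getD 0 [] = trees[0]'hnpos := List.getD_eq_getElem _ _ hnpos
    -- compute the B-side row before edgeRow
    have hgetlast : (trees.set 0 (allTrueRow (trees.getD 0 []))).getD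
        ((trees.set 0 (allTrueRow (trees.getD 0 []))).length - 1) []
        = if trees.length - 1 = 0 then allTrueRow (trees[0]'hnpos)
          else trees[trees.length - 1]'(by omega) := by
      simp only [hlen1]
      rw [List.getD_eq_getElem _ _ (by simp; omega), List.getElem_set]
      simp only [hget0]
      by_cases h10 : trees.length - 1 = 0
      · rw [if_pos h10.symm, if_pos h10]
      · rw [if_neg (fun hh => h10 hh.symm), if_neg h10]
    have hB : ((trees.set 0 (allTrueRow (trees.getD 0 []))).set
          ((trees.set 0 (allTrueRow (trees.getD 0 []))).length - 1)
          (allTrueRow ((trees.set 0 (allTrueRow (trees.getD 0 []))).getD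
            ((trees.set 0 (allTrueRow (trees.getD 0 []))).length - 1) [])))[i]'(by
              simp; exact hilen)
        = if i = 0 ∨ i = trees.length - 1 then allTrueRow (trees[i]'hilen) else trees[i]'hilen := by
      simp only [hgetlast]
      rw [List.getElem_set, List.getElem_set]
      simp only [hget0, hlen1]
      split_ifs <;> simp_all [allTrueRow, List.map_map] <;> omega
    simp only [hB]
    -- now compare the rows elementwise
    have hgetDi : trees.getD i [] = trees[i]'hilen := List.getD_eq_getElem _ _ hilen
    by_cases hc : i = 0 ∨ i = trees.length - 1
    · rw [if_pos hc, edgeRow_allTrue]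
      apply List.ext_getElem
      · simp [allTrueRow]
      intro j hj1 hj2
      rw [List.getElem_mapIdx]
      rw [if_pos (by tauto)]
      simp [allTrueRow]
    · rw [if_neg hc]
      apply List.ext_getElem
      · simp [length_edgeRow]
      intro j hj1 hj2
      have hjr : j < (trees[i]'hilen).length := by simpa using hj1
      rw [List.getElem_mapIdx, getElem_edgeRow _ _ hjr]
      simp only [hgetDi]
      split_ifs <;> tauto
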